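-- pv_equiv track=rewrite | github.com/malzimam/Morphological-segmentation-for-K-iche- | kiche.py | tyndices
-- ===== SOURCE A (Python) =====
-- def tyndices(inp: str):
--     """
--     Returns the indices of morpheme boundaries for a given string as a set
--     :param inp: the string to extract from
--     """
--     if not isinstance(inp, str):
--         raise TypeError("Can only process strings")
--     tyndex = 0
--     ret = set()
--     for i in range(len(inp)):
--         if inp[i] == ">":
--             ret.add(tyndex - 1)
--         else:
--             tyndex += 1
--     return ret
-- ===== SOURCE B (Python) =====
-- def tyndices(inp: str):
--     """
--     Returns the indices of morpheme boundaries for a given string as a set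
--     :param inp: the string to extract from
--     """
--     if not isinstance(inp, str):
--         raise TypeError("Can only process strings")
--     # prefix[i] = number of non-'>' characters in inp[:i]
--     prefix = [0]
--     for c in inp:
--         prefix.append(prefix[-1] + (0 if c == ">" else 1))
--     return {prefix[i] - 1 for i, c in enumerate(inp) if c == ">"}
-- ===== Notes on version B (the rewrite author's own statement) =====
-- stated objective: alternative
-- what changed: Replaces the single accumulating pass (running counter mutated while adding to the set) by a materialized prefix-count table built first, then a separate filter-map pass over enumerate(inp) that reads the table.
import Mathlib
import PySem

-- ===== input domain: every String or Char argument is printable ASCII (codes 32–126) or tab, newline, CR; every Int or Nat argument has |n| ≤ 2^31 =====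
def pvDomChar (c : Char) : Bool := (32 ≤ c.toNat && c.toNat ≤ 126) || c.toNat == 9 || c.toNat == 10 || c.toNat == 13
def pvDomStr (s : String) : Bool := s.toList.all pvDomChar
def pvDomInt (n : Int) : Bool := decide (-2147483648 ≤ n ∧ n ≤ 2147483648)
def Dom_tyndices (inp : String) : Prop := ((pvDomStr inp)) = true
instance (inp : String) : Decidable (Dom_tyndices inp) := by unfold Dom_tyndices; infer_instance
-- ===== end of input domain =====

-- B builds a materialized prefix-count table first, then a separate filter-map pass over
-- enumerate(inp) reads it — an alternative decomposition of A's single accumulating pass.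


-- ===== PORT A =====
-- tyndex = 0; ret = set(); for i in range(len(inp)): if inp[i] == '>': ret.add(tyndex-1) else tyndex += 1
def tyndices (inp : String) : List Int :=
  ((PySem.List.pyRange 0 (PySem.List.len inp.toList) 1).foldl
    (fun (st : Int × PySem.Set Int) i =>
      if PySem.List.pyGetD inp.toList i ' ' = '>' then (st.1, PySem.Set.add st.2 (st.1 - 1))
      else (st.1 + 1, st.2))
    (0, PySem.Set.empty)).2

-- ===== PORT B =====
-- prefix = [0]; for c in inp: prefix.append(prefix[-1] + (0 if c == '>' else 1))
def preTable (cs : List Char) : List Int :=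
  cs.foldl (fun p c => p ++ [PySem.List.pyGetD p (-1) 0 + (if c = '>' then 0 else 1)]) [0]

-- {prefix[i] - 1 for i, c in enumerate(inp) if c == '>'}
def tyndices_alt (inp : String) : List Int :=
  PySem.Set.ofList
    (((PySem.List.enumerate inp.toList 0).filter (fun p => p.2 == '>')).map
      (fun p => PySem.List.pyGetD (preTable inp.toList) p.1 0 - 1))

-- ===== PRECONDITION & SPEC =====
def Spec_tyndices (inp : String) (out : List Int) : Prop := out = tyndices_alt inp
instance (inp : String) (out : List Int) : Decidable (Spec_tyndices inp out) := by unfold Spec_tyndices; infer_instance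

-- ===== CLAIM (what is proved, stated in full; the proofs are below) =====
def Claim_equal_tyndices : Prop := ∀ (inp : String), Dom_tyndices inp → Spec_tyndices inp (tyndices inp)

-- ===== LEMMAS AND PROOFS =====

-- number of non-'>' characters
def cnt (cs : List Char) : Int := (cs.countP (fun c => !(c == '>')) : Int)

-- reference sequence: the values A adds to its set, in order
def seq : List Char → Int → List Int
  | [], _ => []
  | c :: cs, t => if c = '>' then (t - 1) :: seq cs t else seq cs (t + 1)

theorem cnt_append_singleton (cs : List Char) (c : Char) :
    cnt (cs ++ [c]) = cnt cs + (if c = '>' then 0 else 1) := by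
  simp [cnt, List.countP_append, List.countP_cons]

theorem seq_append (xs ys : List Char) (t : Int) :
    seq (xs ++ ys) t = seq xs t ++ seq ys (t + cnt xs) := by
  induction xs generalizing t with
  | nil => simp [seq, cnt]
  | cons c xs ih =>
      by_cases h : c = '>'
      · simp [seq, h, ih, cnt]
      · simp [seq, h, ih, cnt]
        congr 1
        ring

theorem foldl_A (cs : List Char) (t : Int) (s : PySem.Set Int) :
    (cs.foldl
      (fun (st : Int × PySem.Set Int) c =>
        if c = '>' then (st.1, PySem.Set.add st.2 (st.1 - 1)) else (st.1 + 1, st.2))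
      (t, s)).2 = (seq cs t).foldl PySem.Set.add s := by
  induction cs generalizing t s with
  | nil => simp [seq]
  | cons c cs ih => by_cases h : c = '>' <;> simp [seq, h, ih]

theorem preTable_eq (cs : List Char) :
    preTable cs = (List.range (cs.length + 1)).map (fun k => cnt (cs.take k)) := by
  induction cs using List.reverseRecOn with
  | nil => simp [preTable, cnt]
  | append_singleton cs c ih =>
      have hstep : preTable (cs ++ [c]) =
          preTable cs ++ [PySem.List.pyGetD (preTable cs) (-1) 0 + (if c = '>' then 0 else 1)] := by
        simp [preTable, List.foldl_append]
      have hlast : PySem.List.pyGetD (preTable cs) (-1) 0 = cnt cs := by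
        rw [ih, List.range_succ, List.map_append]
        simp [PySem.List.pyGetD_neg_one_append_singleton]
      rw [hstep, hlast, ih]
      simp only [List.length_append, List.length_singleton]
      rw [List.range_succ (n := cs.length + 1), List.map_append]
      congr 1
      · apply List.map_congr_left
        intro k hk
        rw [List.mem_range] at hk
        rw [List.take_append_of_le_length (by omega)]
      · simp only [List.map_cons, List.map_nil]
        rw [List.take_of_length_le (by simp), cnt_append_singleton]

theorem pyGetD_preTable (cs : List Char) (k : Nat) (hk : k ≤ cs.length) :
    PySem.List.pyGetD (preTable cs) (k : Int) 0 = cnt (cs.take k) := by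
  rw [preTable_eq, PySem.List.pyGetD_natCast, PySem.List.getD_map_range _ _ _ _ (by omega)]

theorem getD_preTable (cs : List Char) (k : Nat) (hk : k ≤ cs.length) :
    (preTable cs)[k]?.getD 0 = cnt (cs.take k) := by
  rw [← List.getD_eq_getElem?_getD, preTable_eq, PySem.List.getD_map_range _ _ _ _ (by omega)]

theorem lemB (cs : List Char) :
    ((PySem.List.enumerate cs 0).filter (fun p => p.2 == '>')).map
      (fun p => PySem.List.pyGetD (preTable cs) p.1 0 - 1) = seq cs 0 := by
  induction cs using List.reverseRecOn with
  | nil => simp [PySem.List.enumerate, seq]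
  | append_singleton cs c ih =>
      rw [PySem.List.enumerate_append, List.filter_append, List.map_append, seq_append]
      congr 1
      · -- old pairs: lookups land in the common prefix of the two tables
        rw [← ih]
        apply List.map_congr_left
        intro p hp
        rw [List.mem_filter] at hp
        rcases (PySem.List.mem_enumerate_iff cs 0 p).1 hp.1 with ⟨k, hkl, hpk⟩
        subst hpk
        simp only [zero_add]
        rw [pyGetD_preTable cs k (by omega),
          pyGetD_preTable (cs ++ [c]) k (by simp; omega),
          List.take_append_of_le_length (by omega)]
      · -- the new pair (len cs, c)
        by_cases h : c = '>'
        · subst h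
          simp [PySem.List.enumerate, seq]
          rw [getD_preTable (cs ++ ['>']) cs.length (by simp)]
          rw [List.take_append_of_le_length (le_refl cs.length),
            List.take_of_length_le (le_refl cs.length)]

        · simp [PySem.List.enumerate, h, seq]

-- ===== VERDICT (by name: the statement is the Claim_ definition above) =====
theorem tyndices_spec : Claim_equal_tyndices := by
  intro inp _
  unfold Spec_tyndices tyndices tyndices_alt
  rw [PySem.List.foldl_pyRange_zero_pyGetD inp.toList ' '
      (fun (st : Int × PySem.Set Int) c =>
        if c = '>' then (st.1, PySem.Set.add st.2 (st.1 - 1)) else (st.1 + 1, st.2))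
      (0, PySem.Set.empty)]
  rw [foldl_A, lemB, PySem.Set.ofList_eq_foldl]
  rfl
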